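-- pv_equiv track=rewrite | github.com/voynow/turbo-docs | turbo_docs/generate.py | clean_up_triple_quotes
-- ===== SOURCE A (Python) =====
-- def clean_up_triple_quotes(s):
-- 	"""
--     Validate the given docstring so that the output inside the docstring is valid syntax.
--     """
-- 	if not s.startswith('"""'):
-- 		while s.startswith('"'):
-- 			s = s[1:]
-- 		return clean_up_triple_quotes('"""' + s[1:])
-- 	if not s.endswith('"""'):
-- 		while s.endswith('"'):
-- 			s = s[:-1]
-- 		return clean_up_triple_quotes(s[:-1] + '"""')
-- 	if '"""' in s[3:-3]:
-- 		s_edit = s[3:-3].replace('"""', '\\"\\"\\"')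
-- 		return clean_up_triple_quotes(f'"""{s_edit}"""')
-- 	return s
-- ===== SOURCE B (Python) =====
-- def clean_up_triple_quotes(s):
--     """
--     Validate the given docstring so that the output inside the docstring is valid syntax.
--     """
--     if not s.startswith('"""'):
--         s = '"""' + s.lstrip('"')[1:]
--     if not s.endswith('"""'):
--         s = s.rstrip('"')[:-1] + '"""'
--     while '"""' in s[3:-3]:
--         s = '"""' + s[3:-3].replace('"""', '\\"\\"\\"') + '"""'
--     return s
-- ===== Notes on version B (the rewrite author's own statement) =====
-- stated objective: simpler
-- what changed: A's restart-from-the-top tail recursion (each fix re-runs all three guards from scratch) is replaced by three straight-line phases executed once in order -- prefix fix via lstrip, suffix fix via rstrip, then a small fixpoint loop that only re-does the triple-quote escaping -- justified by the invariant that each delimiter fix is permanent.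
import Mathlib
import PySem

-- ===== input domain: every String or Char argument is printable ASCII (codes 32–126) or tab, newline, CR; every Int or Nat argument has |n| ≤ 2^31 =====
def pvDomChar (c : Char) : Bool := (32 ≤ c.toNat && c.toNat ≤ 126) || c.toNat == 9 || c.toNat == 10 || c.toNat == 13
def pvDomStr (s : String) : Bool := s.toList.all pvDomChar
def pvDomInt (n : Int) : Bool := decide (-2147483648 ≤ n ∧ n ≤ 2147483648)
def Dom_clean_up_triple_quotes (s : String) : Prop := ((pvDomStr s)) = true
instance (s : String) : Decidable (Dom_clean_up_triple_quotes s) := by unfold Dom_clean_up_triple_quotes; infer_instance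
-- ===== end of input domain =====

-- B replaces A's restart-from-the-top recursion by three sequential phases (prefix fix,
-- suffix fix, escape loop); objective: simpler.  Equivalence is proved for ALL strings.

def pvTQ : List Char := ['"', '"', '"']          -- '"""'
def pvESC : List Char := ['\\', '"', '\\', '"', '\\', '"']   -- '\\"\\"\\"'

-- ===== PORT A =====
-- while s.startswith('"'): s = s[1:]
def pvStripLeftA : List Char → List Char
  | [] => []
  | c :: t => if c = '"' then pvStripLeftA t else c :: t

-- while s.endswith('"'): s = s[:-1]
def pvStripRightA (s : List Char) : List Char :=
  if PySem.Chars.endswith s ['"'] then pvStripRightA (PySem.List.slice s none (some (-1))) else s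
termination_by s.length
decreasing_by
  rename_i h
  rw [PySem.List.slice_to_neg_one]
  rcases (PySem.Chars.endswith_iff s ['"']).mp h with ⟨y, hy⟩
  subst hy
  simp

-- fuel-guarded transliteration of A's recursion (branches in source order);
-- the equivalence proof below shows the recursion is done within the given fuel
def pvCleanA : Nat → List Char → List Char
  | 0, s => s
  | fuel + 1, s =>
    if !PySem.Chars.startswith s pvTQ then
      pvCleanA fuel (pvTQ ++ PySem.List.slice (pvStripLeftA s) (some 1) none)
    else if !PySem.Chars.endswith s pvTQ then
      pvCleanA fuel (PySem.List.slice (pvStripRightA s) none (some (-1)) ++ pvTQ)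
    else if PySem.Chars.isIn pvTQ (PySem.List.slice s (some 3) (some (-3))) then
      pvCleanA fuel
        (pvTQ ++ PySem.Chars.replace (PySem.List.slice s (some 3) (some (-3))) pvTQ pvESC ++ pvTQ)
    else s

def clean_up_triple_quotes (s : String) : String :=
  String.ofList (pvCleanA (s.toList.length + 4) s.toList)

-- ===== PORT B =====
-- while '"""' in s[3:-3]: s = '"""' + s[3:-3].replace('"""', '\\"\\"\\"') + '"""'
def pvLoopB : Nat → List Char → List Char
  | 0, s => s
  | fuel + 1, s =>
    let mid := PySem.List.slice s (some 3) (some (-3))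
    if PySem.Chars.isIn pvTQ mid then
      pvLoopB fuel (pvTQ ++ PySem.Chars.replace mid pvTQ pvESC ++ pvTQ)
    else s

def clean_up_triple_quotes_alt (s : String) : String :=
  let l0 := s.toList
  -- s.lstrip('"')[1:] ported as dropWhile/tail (exact for a single strip char)
  let l1 := if PySem.Chars.startswith l0 pvTQ then l0
            else pvTQ ++ (l0.dropWhile (· == '"')).tail
  -- s.rstrip('"')[:-1] ported as rdropWhile/dropLast (exact for a single strip char)
  let l2 := if PySem.Chars.endswith l1 pvTQ then l1
            else (l1.rdropWhile (· == '"')).dropLast ++ pvTQ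
  String.ofList (pvLoopB (l0.length + 4) l2)

-- ===== PRECONDITION & SPEC =====
def Spec_clean_up_triple_quotes (s : String) (out : String) : Prop := out = clean_up_triple_quotes_alt s
instance (s : String) (out : String) : Decidable (Spec_clean_up_triple_quotes s out) := by unfold Spec_clean_up_triple_quotes; infer_instance

-- ===== CLAIM (what is proved, stated in full; the proofs are below) =====
def Claim_equal_clean_up_triple_quotes : Prop := ∀ (s : String), Dom_clean_up_triple_quotes s → Spec_clean_up_triple_quotes s (clean_up_triple_quotes s)

-- ===== LEMMAS AND PROOFS =====

-- proof-side definitions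
def pvRepl : List Char → List Char
  | [] => []
  | c :: t =>
    if pvTQ.isPrefixOf (c :: t) then pvESC ++ pvRepl (t.drop 2) else c :: pvRepl t
termination_by l => l.length
decreasing_by
  all_goals (simp; try omega)

-- run-length scanner: true iff the list, entered with k pending quotes,
-- ever reaches a run of thr consecutive '"'
def pvRun (thr : Nat) : Nat → List Char → Bool
  | _, [] => false
  | k, c :: t => if c = '"' then decide (thr ≤ k + 1) || pvRun thr (k + 1) t else pvRun thr 0 t

def pvHeadQ : List Char → Bool
  | c :: _ => c == '"'
  | [] => false

def pvHead2Q : List Char → Bool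
  | c :: d :: _ => c == '"' && d == '"'
  | _ => false

theorem pvRun_esc (thr : Nat) (hthr : 2 ≤ thr) (k : Nat) (x : List Char) :
    pvRun thr k (pvESC ++ x) = pvRun thr 1 x := by
  have h1 : ¬ thr ≤ 0 + 1 := by omega
  simp [pvESC, pvRun, h1]

theorem pvMid_eq (x : List Char) :
    PySem.List.slice (pvTQ ++ x ++ pvTQ) (some 3) (some (-3)) = x := by
  simp only [PySem.List.slice, PySem.List.clampIdx]
  norm_num
  have h3 : pvTQ.length = 3 := by simp [pvTQ]
  rw [h3]
  split_ifs with hif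
  · push_cast at hif; omega
  · have h4 : (((3:Nat) : Int) + (↑x.length + ((3:Nat) : Int)) + -3).toNat = x.length + 3 := by
      push_cast; omega
    rw [h4]
    have h2 : min (Int.toNat 3) (3 + (x.length + 3)) = 3 := by simp
    rw [h2]
    have h5 : x.length + 3 - 3 = x.length := by omega
    rw [h5]
    have h6 : List.drop 3 (pvTQ ++ (x ++ pvTQ)) = x ++ pvTQ := by
      rw [show (3:Nat) = pvTQ.length from h3.symm, List.drop_left]
    rw [h6, List.take_left']
    rfl

theorem pvEnd_append (x : List Char) : PySem.Chars.endswith (x ++ pvTQ) pvTQ = true :=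
  (PySem.Chars.endswith_iff _ _).mpr (List.suffix_append _ _)

-- A's hand-written strip loops equal B's dropWhile / rdropWhile
theorem pvStripLeft_eq (l : List Char) : pvStripLeftA l = l.dropWhile (· == '"') := by
  induction l with
  | nil => simp [pvStripLeftA]
  | cons c t ih =>
    by_cases hc : c = '"' <;> simp [pvStripLeftA, hc, ih]

theorem pvStripRight_aux : ∀ (n : Nat) (l : List Char), l.length ≤ n →
    pvStripRightA l = l.rdropWhile (· == '"') := by
  intro n
  induction n with
  | zero =>
    intro l h
    have : l = [] := List.eq_nil_of_length_eq_zero (Nat.le_zero.mp h)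
    subst this
    rw [pvStripRightA]
    simp [PySem.Chars.endswith, List.rdropWhile]
  | succ nn ih =>
    intro l h
    rw [pvStripRightA]
    by_cases he : PySem.Chars.endswith l ['"'] = true
    · rcases (PySem.Chars.endswith_iff l ['"']).mp he with ⟨y, hy⟩
      subst hy
      rw [if_pos he, PySem.List.slice_to_neg_one, List.dropLast_concat,
        List.rdropWhile_concat]
      simp only [BEq.rfl, if_true]
      apply ih
      simpa using h
    · rw [if_neg he]
      rcases List.eq_nil_or_concat l with rfl | ⟨y, c, rfl⟩
      · simp
      · have hc : ¬ (c == '"') = true := by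
          intro hcq
          exact he ((PySem.Chars.endswith_iff _ _).mpr ⟨y, by simp [eq_of_beq hcq]⟩)
        rw [List.concat_eq_append, List.rdropWhile_concat, if_neg hc]

theorem pvStripRight_eq (l : List Char) : pvStripRightA l = l.rdropWhile (· == '"') :=
  pvStripRight_aux l.length l le_rfl

-- Python's str.replace (left-to-right, non-overlapping) equals the structural pvRepl
theorem pvGo_eq : ∀ (fuel : Nat) (l acc : List Char), l.length ≤ fuel →
    PySem.Chars.replace.go pvTQ pvESC fuel l acc = acc.reverse ++ pvRepl l := by
  intro fuel
  induction fuel with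
  | zero =>
    intro l acc h
    have : l = [] := List.eq_nil_of_length_eq_zero (Nat.le_zero.mp h)
    subst this
    simp [PySem.Chars.replace.go, pvRepl]
  | succ f ih =>
    intro l acc h
    cases l with
    | nil =>
      simp [PySem.Chars.replace.go, pvRepl]
    | cons c t =>
      rw [PySem.Chars.replace.go, pvRepl]
      by_cases hp : pvTQ.isPrefixOf (c :: t) = true
      · rw [if_pos hp, if_pos hp]
        rw [ih _ _ (by simp [pvTQ] at h ⊢; omega)]
        simp [pvTQ]
      · rw [if_neg hp, if_neg hp]
        rw [ih _ _ (by simp at h ⊢; omega)]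
        simp

theorem pvReplace_eq (l : List Char) : PySem.Chars.replace l pvTQ pvESC = pvRepl l := by
  rw [PySem.Chars.replace]
  rw [if_neg (by simp [pvTQ])]
  exact pvGo_eq l.length l [] le_rfl

theorem pvPrefix_dest (c : Char) (t : List Char) (hp : pvTQ.isPrefixOf (c :: t) = true) :
    ∃ t₂, c = '"' ∧ t = '"' :: '"' :: t₂ := by
  rcases List.isPrefixOf_iff_prefix.mp hp with ⟨r, hr⟩
  simp only [pvTQ] at hr
  exact ⟨r, by injection hr with h1 h2; exact h1.symm, by
    injection hr with h1 h2; exact h2.symm⟩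

theorem pvNoPrefix_head (c : Char) (t : List Char) (hc : c = '"')
    (hp : ¬ pvTQ.isPrefixOf (c :: t) = true) : pvHead2Q t = false := by
  subst hc
  cases t with
  | nil => rfl
  | cons d t₂ =>
    cases t₂ with
    | nil => simp [pvHead2Q]
    | cons e t₃ =>
      by_cases hd : d = '"'
      · by_cases he : e = '"'
        · exact absurd (by simp [pvTQ, List.isPrefixOf, hd, he]) hp
        · simp [pvHead2Q, he]
      · simp [pvHead2Q, hd]

theorem pvHead2Q_cons (t : List Char) : pvHead2Q ('"' :: t) = pvHeadQ t := by
  cases t <;> simp [pvHead2Q, pvHeadQ]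

theorem pvHead2Q_of_headQ (t : List Char) (h : pvHeadQ t = false) : pvHead2Q t = false := by
  cases t with
  | nil => rfl
  | cons c d =>
    cases d with
    | nil => simp [pvHead2Q]
    | cons e t₃ =>
      simp [pvHeadQ] at h
      simp [pvHead2Q, h]

theorem pvC1 : ∀ (n : Nat) (l : List Char) (k : Nat), l.length ≤ n →
    (k ≤ 1 ∨ (k ≤ 2 ∧ pvHead2Q l = false) ∨ (k ≤ 3 ∧ pvHeadQ l = false)) →
    pvRun 4 k (pvRepl l) = false := by
  intro n
  induction n with
  | zero =>
    intro l k h _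
    have := List.eq_nil_of_length_eq_zero (Nat.le_zero.mp h)
    subst this
    simp [pvRepl, pvRun]
  | succ nn ih =>
    intro l k hlen hinv
    cases l with
    | nil => simp [pvRepl, pvRun]
    | cons c t =>
      rw [pvRepl]
      by_cases hp : pvTQ.isPrefixOf (c :: t) = true
      · rw [if_pos hp, pvRun_esc 4 (by omega)]
        obtain ⟨t₂, hc, ht⟩ := pvPrefix_dest c t hp
        subst hc; subst ht
        simp only [List.drop_succ_cons, List.drop_zero]
        apply ih t₂ 1 (by simp at hlen; omega)
        left; omega
      · rw [if_neg hp]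
        by_cases hcq : c = '"'
        · have ht2 : pvHead2Q t = false := pvNoPrefix_head c t hcq hp
          subst hcq
          have hk : k ≤ 2 := by
            rcases hinv with h | ⟨h, _⟩ | ⟨h, hq⟩
            · omega
            · omega
            · exfalso; simp [pvHeadQ] at hq
          have hnr : ¬ (4 ≤ k + 1) := by omega
          simp only [pvRun, decide_eq_false hnr, Bool.false_or]
          apply ih t (k + 1) (by simp at hlen; omega)
          by_cases hk0 : k = 0
          · left; omega
          by_cases hk1 : k = 1
          · right; left; exact ⟨by omega, ht2⟩
          · have hk2 : k = 2 := by omega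
            right; right
            refine ⟨by omega, ?_⟩
            rcases hinv with h | ⟨h, h2q⟩ | ⟨h, hq⟩
            · omega
            · rw [← pvHead2Q_cons]; exact h2q
            · exfalso; simp [pvHeadQ] at hq
        · simp only [pvRun, if_neg hcq]
          apply ih t 0 (by simp at hlen; omega)
          left; omega

theorem pvC2 : ∀ (n : Nat) (r : List Char) (k j : Nat), r.length ≤ n →
    pvRun 4 j r = false →
    (k = 0 ∨ (k ≤ 1 ∧ pvHead2Q r = false) ∨ (k ≤ 2 ∧ pvHeadQ r = false)) →
    pvRun 3 k (pvRepl r) = false := by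
  intro n
  induction n with
  | zero =>
    intro r k j h _ _
    have := List.eq_nil_of_length_eq_zero (Nat.le_zero.mp h)
    subst this
    simp [pvRepl, pvRun]
  | succ nn ih =>
    intro r k j hlen hno4 hinv
    cases r with
    | nil => simp [pvRepl, pvRun]
    | cons c t =>
      rw [pvRepl]
      by_cases hp : pvTQ.isPrefixOf (c :: t) = true
      · rw [if_pos hp, pvRun_esc 3 (by omega)]
        obtain ⟨t₂, hc, ht⟩ := pvPrefix_dest c t hp
        subst hc; subst ht
        simp only [List.drop_succ_cons, List.drop_zero]
        simp [pvRun] at hno4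
        obtain ⟨h1, h2, h3, h4⟩ := hno4
        have hj : j = 0 := by omega
        subst hj
        have hq2 : pvHeadQ t₂ = false := by
          cases t₂ with
          | nil => rfl
          | cons e t₃ =>
            by_cases he : e = '"'
            · subst he
              simp [pvRun] at h4
            · simp [pvHeadQ, he]
        apply ih t₂ 1 (0 + 1 + 1 + 1) (by simp at hlen; omega) h4
        right; left; exact ⟨le_refl 1, pvHead2Q_of_headQ t₂ hq2⟩
      · rw [if_neg hp]
        by_cases hcq : c = '"'
        · have ht2 : pvHead2Q t = false := pvNoPrefix_head c t hcq hp
          subst hcq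
          simp [pvRun] at hno4
          obtain ⟨hj1, hjt⟩ := hno4
          have hk : k ≤ 1 := by
            rcases hinv with h | ⟨h, _⟩ | ⟨h, hq⟩
            · omega
            · omega
            · exfalso; simp [pvHeadQ] at hq
          have hnr : ¬ (3 ≤ k + 1) := by omega
          simp only [pvRun, decide_eq_false hnr, Bool.false_or]
          apply ih t (k + 1) (j + 1) (by simp at hlen; omega) hjt
          by_cases hk0 : k = 0
          · right; left; exact ⟨by omega, ht2⟩
          · have hk1 : k = 1 := by omega
            right; right
            refine ⟨by omega, ?_⟩
            rcases hinv with h | ⟨h, h2q⟩ | ⟨h, hq⟩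
            · omega
            · rw [← pvHead2Q_cons]; exact h2q
            · exfalso; simp [pvHeadQ] at hq
        · simp only [pvRun, if_neg hcq] at hno4 ⊢
          apply ih t 0 0 (by simp at hlen; omega) hno4
          left; rfl

theorem pvRun_of_infix : ∀ (x : List Char), pvTQ <:+: x → ∀ k, pvRun 3 k x = true := by
  intro x
  induction x with
  | nil =>
    intro h k
    rw [List.infix_nil] at h
    exact absurd h (by simp [pvTQ])
  | cons c t ih =>
    intro h k
    rcases List.infix_cons_iff.mp h with hpre | hinf
    · rcases hpre with ⟨r, hr⟩
      simp only [pvTQ] at hr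
      obtain ⟨hc, ht⟩ : c = '"' ∧ t = '"' :: '"' :: r := by
        constructor
        · injection hr with h1 _; exact h1.symm
        · injection hr with _ h2; exact h2.symm
      subst hc; subst ht
      have h3 : (3:Nat) ≤ k + 1 + 1 + 1 := by omega
      simp [pvRun, h3]
    · by_cases hcq : c = '"'
      · subst hcq
        simp only [pvRun]
        rw [ih hinf (k+1)]
        simp
      · simp only [pvRun, if_neg hcq]
        exact ih hinf 0

theorem pvDone2 (l : List Char) :
    PySem.Chars.isIn pvTQ
      (PySem.Chars.replace (PySem.Chars.replace l pvTQ pvESC) pvTQ pvESC) = false := by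
  rw [pvReplace_eq, pvReplace_eq]
  apply (PySem.Chars.isIn_eq_false_iff _ _).mpr
  intro hinf
  have htrue := pvRun_of_infix _ hinf 0
  have hfalse := pvC2 (pvRepl l).length (pvRepl l) 0 0 le_rfl
    (pvC1 l.length l 0 le_rfl (by left; omega)) (by left; rfl)
  rw [htrue] at hfalse
  simp at hfalse

theorem pvRdrop_append (a b : List Char) (hb : b.rdropWhile (· == '"') ≠ []) :
    (a ++ b).rdropWhile (· == '"') = a ++ b.rdropWhile (· == '"') := by
  rw [List.rdropWhile, List.rdropWhile, List.reverse_append, List.dropWhile_append]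
  split_ifs with h
  · exfalso
    apply hb
    rw [List.rdropWhile]
    simp only [List.isEmpty_iff] at h
    rw [h]
    rfl
  · simp

theorem pvPhase2_start (t : List Char)
    (hs : PySem.Chars.startswith t pvTQ = true)
    (he : PySem.Chars.endswith t pvTQ = false) :
    PySem.Chars.startswith ((t.rdropWhile (· == '"')).dropLast ++ pvTQ) pvTQ = true := by
  rcases (PySem.Chars.startswith_iff _ _).mp hs with ⟨r, hr⟩
  subst hr
  by_cases hrd : r.rdropWhile (· == '"') = []
  · exfalso
    have hall : ∀ x ∈ r, x = '"' := by
      intro x hx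
      exact eq_of_beq (List.rdropWhile_eq_nil_iff.mp hrd x hx)
    have hrep : r = List.replicate r.length '"' := List.eq_replicate_of_mem hall
    apply absurd he
    simp only [Bool.not_eq_false]
    apply (PySem.Chars.endswith_iff _ _).mpr
    refine ⟨List.replicate r.length '"', ?_⟩
    conv_rhs => rw [hrep]
    show List.replicate r.length '"' ++ List.replicate 3 '"'
        = List.replicate 3 '"' ++ List.replicate r.length '"'
    rw [List.replicate_append_replicate, List.replicate_append_replicate, Nat.add_comm]
  · rw [pvRdrop_append pvTQ r hrd, List.dropLast_append]
    rw [if_neg (by simpa [List.isEmpty_iff] using hrd)]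
    apply (PySem.Chars.startswith_iff _ _).mpr
    rw [List.append_assoc]
    exact List.prefix_append _ _

-- one-step unfoldings
theorem pvCleanA_succ (f : Nat) (s : List Char) : pvCleanA (f + 1) s =
    if !PySem.Chars.startswith s pvTQ then
      pvCleanA f (pvTQ ++ PySem.List.slice (pvStripLeftA s) (some 1) none)
    else if !PySem.Chars.endswith s pvTQ then
      pvCleanA f (PySem.List.slice (pvStripRightA s) none (some (-1)) ++ pvTQ)
    else if PySem.Chars.isIn pvTQ (PySem.List.slice s (some 3) (some (-3))) then
      pvCleanA f
        (pvTQ ++ PySem.Chars.replace (PySem.List.slice s (some 3) (some (-3))) pvTQ pvESC ++ pvTQ)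
    else s := rfl

theorem pvLoopB_succ (f : Nat) (s : List Char) : pvLoopB (f + 1) s =
    (if PySem.Chars.isIn pvTQ (PySem.List.slice s (some 3) (some (-3))) then
      pvLoopB f (pvTQ ++ PySem.Chars.replace (PySem.List.slice s (some 3) (some (-3))) pvTQ pvESC ++ pvTQ)
    else s) := rfl

theorem pvLoopB_done (f : Nat) (u : List Char)
    (h : PySem.Chars.isIn pvTQ (PySem.List.slice u (some 3) (some (-3))) = false) :
    pvLoopB f u = u := by
  cases f with
  | zero => rfl
  | succ f => rw [pvLoopB_succ, if_neg (by simp [h])]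

theorem pvCleanA_done (f : Nat) (u : List Char)
    (hs : PySem.Chars.startswith u pvTQ = true)
    (he : PySem.Chars.endswith u pvTQ = true)
    (h : PySem.Chars.isIn pvTQ (PySem.List.slice u (some 3) (some (-3))) = false) :
    pvCleanA f u = u := by
  cases f with
  | zero => rfl
  | succ f =>
    rw [pvCleanA_succ, hs, he]
    simp [h]

theorem pvStart_step (x : List Char) :
    PySem.Chars.startswith (pvTQ ++ x ++ pvTQ) pvTQ = true := by
  apply (PySem.Chars.startswith_iff _ _).mpr
  rw [List.append_assoc]
  exact List.prefix_append _ _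

theorem pvEnd_step (x : List Char) :
    PySem.Chars.endswith (pvTQ ++ x ++ pvTQ) pvTQ = true :=
  (PySem.Chars.endswith_iff _ _).mpr (List.suffix_append _ _)

-- once the delimiters are in place, A's remaining recursion is exactly B's loop
-- (the loop stops within 2 iterations — pvDone2 — so any fuel ≥ 2 on both sides agrees)
theorem pvLoop_eq (f₁ f₂ : Nat) (t : List Char) (h₁ : 2 ≤ f₁) (h₂ : 2 ≤ f₂)
    (hs : PySem.Chars.startswith t pvTQ = true)
    (he : PySem.Chars.endswith t pvTQ = true) :
    pvCleanA f₁ t = pvLoopB f₂ t := by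
  obtain ⟨a, rfl⟩ : ∃ a, f₁ = a + 2 := ⟨f₁ - 2, by omega⟩
  obtain ⟨b, rfl⟩ : ∃ b, f₂ = b + 2 := ⟨f₂ - 2, by omega⟩
  by_cases hin : PySem.Chars.isIn pvTQ (PySem.List.slice t (some 3) (some (-3))) = true
  · rw [show a + 2 = (a + 1) + 1 from rfl, pvCleanA_succ, hs, he]
    rw [show b + 2 = (b + 1) + 1 from rfl, pvLoopB_succ]
    simp only [hin, if_true, Bool.not_true, Bool.false_eq_true, if_false]
    set m1 := PySem.Chars.replace (PySem.List.slice t (some 3) (some (-3))) pvTQ pvESC with hm1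
    by_cases hin2 : PySem.Chars.isIn pvTQ
        (PySem.List.slice (pvTQ ++ m1 ++ pvTQ) (some 3) (some (-3))) = true
    · rw [pvCleanA_succ, pvStart_step, pvEnd_step, pvLoopB_succ]
      simp only [hin2, if_true, Bool.not_true, Bool.false_eq_true, if_false]
      have hdone : PySem.Chars.isIn pvTQ
          (PySem.List.slice
            (pvTQ ++ PySem.Chars.replace (PySem.List.slice (pvTQ ++ m1 ++ pvTQ) (some 3) (some (-3))) pvTQ pvESC ++ pvTQ)
            (some 3) (some (-3))) = false := by
        rw [pvMid_eq, pvMid_eq, hm1]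
        exact pvDone2 _
      rw [pvCleanA_done a _ (pvStart_step _) (pvEnd_step _) hdone,
        pvLoopB_done b _ hdone]
    · have hdone2 : PySem.Chars.isIn pvTQ
          (PySem.List.slice (pvTQ ++ m1 ++ pvTQ) (some 3) (some (-3))) = false := by
        simpa using hin2
      rw [pvCleanA_done (a+1) _ (pvStart_step _) (pvEnd_step _) hdone2,
        pvLoopB_done (b+1) _ hdone2]
  · have hdone : PySem.Chars.isIn pvTQ (PySem.List.slice t (some 3) (some (-3))) = false := by
      simpa using hin
    rw [pvCleanA_done (a+2) t hs he hdone, pvLoopB_done (b+2) t hdone]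

-- ===== VERDICT (by name: the statement is the Claim_ definition above) =====
theorem clean_up_triple_quotes_spec : Claim_equal_clean_up_triple_quotes := by
  unfold Claim_equal_clean_up_triple_quotes
  intro s _
  unfold Spec_clean_up_triple_quotes clean_up_triple_quotes clean_up_triple_quotes_alt
  show String.ofList (pvCleanA (s.toList.length + 4) s.toList)
      = String.ofList (pvLoopB (s.toList.length + 4) _)
  apply congrArg
  set l := s.toList with hl
  by_cases hs1 : PySem.Chars.startswith l pvTQ = true
  · rw [if_pos hs1]
    by_cases he1 : PySem.Chars.endswith l pvTQ = true
    · rw [if_pos he1]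
      exact pvLoop_eq _ _ _ (by omega) (by omega) hs1 he1
    · rw [if_neg he1]
      have estep : pvCleanA (l.length + 4) l
          = pvCleanA (l.length + 3) ((l.rdropWhile (· == '"')).dropLast ++ pvTQ) := by
        rw [show l.length + 4 = (l.length + 3) + 1 from rfl, pvCleanA_succ, hs1,
          eq_false_of_ne_true he1]
        simp [pvStripRight_eq, PySem.List.slice_to_neg_one]
      rw [estep]
      exact pvLoop_eq _ _ _ (by omega) (by omega)
        (pvPhase2_start l hs1 (eq_false_of_ne_true he1)) (pvEnd_append _)
  · rw [if_neg hs1]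
    have estep1 : pvCleanA (l.length + 4) l
        = pvCleanA (l.length + 3) (pvTQ ++ (l.dropWhile (· == '"')).tail) := by
      rw [show l.length + 4 = (l.length + 3) + 1 from rfl, pvCleanA_succ,
        eq_false_of_ne_true hs1]
      simp [pvStripLeft_eq, PySem.List.slice_from_one]
    rw [estep1]
    set l1 := pvTQ ++ (l.dropWhile (· == '"')).tail with hl1
    have hs2 : PySem.Chars.startswith l1 pvTQ = true :=
      (PySem.Chars.startswith_iff _ _).mpr (List.prefix_append _ _)
    by_cases he2 : PySem.Chars.endswith l1 pvTQ = true
    · rw [if_pos he2]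
      exact pvLoop_eq _ _ _ (by omega) (by omega) hs2 he2
    · rw [if_neg he2]
      have estep2 : pvCleanA (l.length + 3) l1
          = pvCleanA (l.length + 2) ((l1.rdropWhile (· == '"')).dropLast ++ pvTQ) := by
        rw [show l.length + 3 = (l.length + 2) + 1 from rfl, pvCleanA_succ, hs2,
          eq_false_of_ne_true he2]
        simp [pvStripRight_eq, PySem.List.slice_to_neg_one]
      rw [estep2]
      exact pvLoop_eq _ _ _ (by omega) (by omega)
        (pvPhase2_start l1 hs2 (eq_false_of_ne_true he2)) (pvEnd_append _)
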